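-- pv_equiv track=rewrite | github.com/jk-jung/problem-solving | codewars/7kyu/7_Race Ceremony.py | race_podium
-- ===== SOURCE A (Python) =====
-- def race_podium(n):
--     for a in range(n):
--         b = a - 1
--         c = n - a - b
--         if a > b > c > 0: return (b, a, c)
--     for a in range(n):
--         b = a - 2
--         c = n - a - b
--         if a > b > c > 0: return (b, a, c)
-- ===== SOURCE B (Python) =====
-- def race_podium(n):
--     # smallest a with a > a-1 > n-2a+1 > 0 is (n+2)//3 + 1; check c, else d=2 case
--     a = (n + 2) // 3 + 1
--     c = n - 2 * a + 1
--     if c > 0: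
--         return (a - 1, a, c)
--     a = (n + 4) // 3 + 1
--     c = n - 2 * a + 2
--     if c > 0:
--         return (a - 2, a, c)
-- ===== Notes on version B (the rewrite author's own statement) =====
-- stated objective: faster
-- what changed: replaced the two linear scans over range(n) by solving the inequalities a-d > n-2a+d > 0 for the minimal a with floor division, giving an O(1) closed form
import Mathlib
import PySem

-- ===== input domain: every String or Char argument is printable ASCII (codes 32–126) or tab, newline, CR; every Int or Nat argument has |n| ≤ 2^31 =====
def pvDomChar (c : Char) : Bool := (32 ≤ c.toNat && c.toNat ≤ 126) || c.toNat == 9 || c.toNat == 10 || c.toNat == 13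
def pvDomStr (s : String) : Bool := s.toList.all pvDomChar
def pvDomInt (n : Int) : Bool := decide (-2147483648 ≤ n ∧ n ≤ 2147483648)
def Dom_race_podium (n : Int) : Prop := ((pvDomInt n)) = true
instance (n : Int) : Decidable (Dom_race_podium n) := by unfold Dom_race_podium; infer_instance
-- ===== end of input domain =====

-- B replaces A's two O(n) scans by an O(1) closed form: solve the podium inequalities for the minimal a with floor division.

-- ===== PORT A =====
-- one 'for a in range(n)' loop of A, with b = a - d (d = 1 for the first loop, 2 for the second);
-- fuel k = number of remaining iterations, a = current loop variable
def raceLoop (n d : Int) : Int → Nat → Option (Int × Int × Int)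
  | _, 0 => none
  | a, k + 1 =>
    let b := a - d
    let c := n - a - b
    if a > b ∧ b > c ∧ c > 0 then some (b, a, c) else raceLoop n d (a + 1) k

def race_podium (n : Int) : Option (Int × Int × Int) :=
  match raceLoop n 1 0 n.toNat with
  | some r => some r
  | none => raceLoop n 2 0 n.toNat

-- ===== PORT B =====
def race_podium_alt (n : Int) : Option (Int × Int × Int) :=
  let a := PySem.Int.floordiv (n + 2) 3 + 1
  let c := n - 2 * a + 1
  if c > 0 then some (a - 1, a, c)
  else
    let a2 := PySem.Int.floordiv (n + 4) 3 + 1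
    let c2 := n - 2 * a2 + 2
    if c2 > 0 then some (a2 - 2, a2, c2) else none

-- ===== PRECONDITION & SPEC =====
def Spec_race_podium (n : Int) (out : Option (Int × Int × Int)) : Prop := out = race_podium_alt n
instance (n : Int) (out : Option (Int × Int × Int)) : Decidable (Spec_race_podium n out) := by unfold Spec_race_podium; infer_instance

-- ===== CLAIM (what is proved, stated in full; the proofs are below) =====
def Claim_equal_race_podium : Prop := ∀ (n : Int), Dom_race_podium n → Spec_race_podium n (race_podium n)

-- ===== LEMMAS AND PROOFS =====

-- the loop returns none when the guard fails on every visited index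
lemma raceLoop_none (n d : Int) (k : Nat) (a : Int)
    (h : ∀ x : Int, a ≤ x → x < a + k → ¬ (x > x - d ∧ x - d > n - x - (x - d) ∧ n - x - (x - d) > 0)) :
    raceLoop n d a k = none := by
  induction k generalizing a with
  | zero => rfl
  | succ k ih =>
    rw [raceLoop]
    rw [if_neg (h a (le_refl a) (by omega))]
    exact ih (a + 1) (fun x hx1 hx2 => h x (by omega) (by omega))

-- the loop returns the tuple at the first index satisfying the guard
lemma raceLoop_some (n d : Int) (k : Nat) (a t : Int)
    (hat : a ≤ t) (htk : t < a + k)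
    (hc : t > t - d ∧ t - d > n - t - (t - d) ∧ n - t - (t - d) > 0)
    (hmin : ∀ x : Int, a ≤ x → x < t → ¬ (x > x - d ∧ x - d > n - x - (x - d) ∧ n - x - (x - d) > 0)) :
    raceLoop n d a k = some (t - d, t, n - t - (t - d)) := by
  induction k generalizing a with
  | zero => omega
  | succ k ih =>
    rw [raceLoop]
    by_cases hat' : a = t
    · subst hat'; rw [if_pos hc]
    · rw [if_neg (hmin a (le_refl a) (by omega))]
      exact ih (a + 1) (by omega) (by omega) (fun x hx1 hx2 => hmin x (by omega) hx2)

-- closed form for one loop: with aStar = (n+2d)//3 + 1, the loop returns the aStar tuple iff its c is positive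
lemma raceLoop_closed (n d : Int) (hd : 0 < d) :
    raceLoop n d 0 n.toNat =
      (if n - 2 * (PySem.Int.floordiv (n + 2 * d) 3 + 1) + d > 0
       then some (PySem.Int.floordiv (n + 2 * d) 3 + 1 - d,
                  PySem.Int.floordiv (n + 2 * d) 3 + 1,
                  n - 2 * (PySem.Int.floordiv (n + 2 * d) 3 + 1) + d)
       else none) := by
  rw [PySem.Int.floordiv_eq_ediv_of_pos (by omega : (0:Int) < 3)]
  set q := (n + 2 * d) / 3 with hq
  have hq3 : 3 * q ≤ n + 2 * d ∧ n + 2 * d < 3 * q + 3 := by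
    constructor <;> omega
  set t := q + 1 with ht
  by_cases hc : n - 2 * t + d > 0
  · rw [if_pos hc]
    have := raceLoop_some n d n.toNat 0 t (by omega) (by omega)
      ⟨by omega, by omega, by omega⟩
      (fun x hx1 hx2 => by intro ⟨h1, h2, h3⟩; omega)
    rw [this]
    have hcc : n - t - (t - d) = n - 2 * t + d := by omega
    rw [hcc]
  · rw [if_neg hc]
    exact raceLoop_none n d n.toNat 0 (fun x hx1 hx2 => by intro ⟨h1, h2, h3⟩; omega)

-- ===== VERDICT (by name: the statement is the Claim_ definition above) =====
theorem race_podium_spec : Claim_equal_race_podium := by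
  intro n _
  unfold Spec_race_podium race_podium race_podium_alt
  rw [raceLoop_closed n 1 (by omega), raceLoop_closed n 2 (by omega)]
  norm_num
  split_ifs <;> simp_all
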